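-- pv_equiv track=rewrite | github.com/Awosborn/GEKO-Project-301 | MVP/BidRecommender.py | _last_contract
-- ===== SOURCE A (Python) =====
-- from typing import Dict, List, Optional, Protocol, Sequence, Tuple
--
-- def _last_contract(bid_history: Sequence[Sequence[Optional[str]]]) -> Optional[str]:
--     last_contract_bid: Optional[str] = None
--     for row in bid_history:
--         for bid in row:
--             if bid is None:
--                 continue
--             clean = bid.strip().upper()
--             if clean not in {"P", "X", "XX"}:
--                 last_contract_bid = clean
--     return last_contract_bid
-- ===== SOURCE B (Python) =====
-- from typing import Optional, Sequence
--
-- def _last_contract(bid_history: Sequence[Sequence[Optional[str]]]) -> Optional[str]: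
--     for row in reversed(bid_history):
--         for bid in reversed(row):
--             if bid is None:
--                 continue
--             clean = bid.strip().upper()
--             if clean not in {"P", "X", "XX"}:
--                 return clean
--     return None
-- ===== Notes on version B (the rewrite author's own statement) =====
-- stated objective: alternative
-- what changed: B scans the history backward (reversed rows, reversed bids within a row) and returns the first contract bid it meets, instead of A's forward sweep that keeps overwriting an accumulator to the end.
import Mathlib
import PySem

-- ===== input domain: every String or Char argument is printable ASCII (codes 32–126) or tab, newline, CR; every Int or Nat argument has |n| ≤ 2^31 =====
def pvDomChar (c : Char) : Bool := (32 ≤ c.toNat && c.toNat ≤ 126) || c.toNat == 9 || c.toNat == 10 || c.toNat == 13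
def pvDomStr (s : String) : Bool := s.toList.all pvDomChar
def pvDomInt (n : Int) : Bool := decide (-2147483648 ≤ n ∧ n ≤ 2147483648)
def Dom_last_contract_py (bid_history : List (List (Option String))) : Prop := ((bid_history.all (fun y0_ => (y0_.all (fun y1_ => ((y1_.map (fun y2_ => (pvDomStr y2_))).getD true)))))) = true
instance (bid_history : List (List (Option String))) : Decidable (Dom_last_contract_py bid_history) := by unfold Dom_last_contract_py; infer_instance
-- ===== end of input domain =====

-- ===== PORT A =====
-- per-bid test shared wording of A's code: skip None, clean = bid.strip().upper(), pass/double check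
def last_contract_py (bid_history : List (List (Option String))) : Option String :=
  bid_history.foldl (fun acc row =>
    row.foldl (fun acc bid =>
      match bid with
      | none => acc
      | some b =>
        let clean := PySem.Str.upper (PySem.Str.strip b)
        if clean = "P" ∨ clean = "X" ∨ clean = "XX" then acc else some clean) acc) none

-- ===== PORT B =====
-- B: reverse traversal with early exit — first contract bid seen from the end.
def pvBidScan (bid : Option String) : Option String :=
  match bid with
  | none => none
  | some b =>
    let clean := PySem.Str.upper (PySem.Str.strip b)
    if clean = "P" ∨ clean = "X" ∨ clean = "XX" then none else some clean

def last_contract_py_alt (bid_history : List (List (Option String))) : Option String :=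
  bid_history.reverse.findSome? (fun row => row.reverse.findSome? pvBidScan)

-- ===== PRECONDITION & SPEC =====
def Spec_last_contract_py (bid_history : List (List (Option String))) (out : Option String) : Prop := out = last_contract_py_alt bid_history
instance (bid_history : List (List (Option String))) (out : Option String) : Decidable (Spec_last_contract_py bid_history out) := by unfold Spec_last_contract_py; infer_instance

-- ===== CLAIM (what is proved, stated in full; the proofs are below) =====
def Claim_equal_last_contract_py : Prop := ∀ (bid_history : List (List (Option String))), Dom_last_contract_py bid_history → Spec_last_contract_py bid_history (last_contract_py bid_history)

-- ===== LEMMAS AND PROOFS =====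

-- ===== VERDICT (by name: the statement is the Claim_ definition above) =====
-- foldl that overwrites the accumulator with `f x` when it is some
-- equals the first hit of f on the reversed list, seeded with the start value.
theorem pv_foldl_or {α β : Type} (f : α → Option β) (l : List α) (a : Option β) :
    l.foldl (fun acc x => ((f x).or acc)) a = (l.reverse.findSome? f).or a := by
  induction l generalizing a with
  | nil => simp
  | cons x t ih =>
    simp [List.foldl_cons, ih, List.findSome?_append, List.findSome?_cons]
    cases h : t.reverse.findSome? f <;> cases h2 : f x <;> simp [Option.or]

theorem pv_step_eq (acc : Option String) (bid : Option String) :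
    (match bid with
      | none => acc
      | some b =>
        let clean := PySem.Str.upper (PySem.Str.strip b)
        if clean = "P" ∨ clean = "X" ∨ clean = "XX" then acc else some clean)
    = ((pvBidScan bid).or acc) := by
  cases bid with
  | none => rfl
  | some b =>
    simp only [pvBidScan]
    split <;> simp [Option.or]

theorem last_contract_py_spec : Claim_equal_last_contract_py := by
  intro bh _
  unfold Spec_last_contract_py last_contract_py last_contract_py_alt
  have hrow : ∀ (row : List (Option String)) (acc : Option String),
      row.foldl (fun acc bid =>
        match bid with
        | none => acc
        | some b =>
          let clean := PySem.Str.upper (PySem.Str.strip b)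
          if clean = "P" ∨ clean = "X" ∨ clean = "XX" then acc else some clean) acc
      = ((row.reverse.findSome? pvBidScan).or acc) := by
    intro row acc
    have := pv_foldl_or pvBidScan row acc
    rw [← this]
    congr 1
    funext a b
    exact pv_step_eq a b
  calc bh.foldl (fun acc row =>
          row.foldl (fun acc bid =>
            match bid with
            | none => acc
            | some b =>
              let clean := PySem.Str.upper (PySem.Str.strip b)
              if clean = "P" ∨ clean = "X" ∨ clean = "XX" then acc else some clean) acc) none
      = bh.foldl (fun acc row => ((row.reverse.findSome? pvBidScan).or acc)) none := by
          congr 1; funext acc row; exact hrow row acc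
    _ = ((bh.reverse.findSome? (fun row => row.reverse.findSome? pvBidScan)).or none) :=
          pv_foldl_or _ bh none
    _ = bh.reverse.findSome? (fun row => row.reverse.findSome? pvBidScan) := by
          cases h : bh.reverse.findSome? (fun row => row.reverse.findSome? pvBidScan) <;> simp [Option.or]
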